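-- pv_equiv track=rewrite | github.com/Matthew1906/100DaysOfPython | Day 81-100 (Professional)/92/utils.py | get_num_of_lectures
-- ===== SOURCE A (Python) =====
-- def get_num_of_lectures(info:list):
--     '''Get number of lectures'''
--     info = [detail.strip() for detail in info]
--     lectures = list(filter(lambda x: x.endswith('lectures'), info))
--     if len(lectures)==0:
--         return '-'
--     lecture_index = info.index(lectures[0])
--     num_of_lecture = info[lecture_index]
--     return num_of_lecture[0:num_of_lecture.index('lectures')-1]
-- ===== SOURCE B (Python) =====
-- def get_num_of_lectures(info:list):
--     '''Get number of lectures: single scan with early return'''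
--     for detail in info:
--         elem = detail.strip()
--         if elem.endswith('lectures'):
--             return elem[0:elem.index('lectures')-1]
--     return '-'
-- ===== Notes on version B (the rewrite author's own statement) =====
-- stated objective: simpler
-- what changed: Replaces the strip-all / filter / length-check / list.index re-lookup pipeline with a single scan that strips each element lazily and returns the sliced count at the first element ending in 'lectures', or '-' after the loop.
import Mathlib
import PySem

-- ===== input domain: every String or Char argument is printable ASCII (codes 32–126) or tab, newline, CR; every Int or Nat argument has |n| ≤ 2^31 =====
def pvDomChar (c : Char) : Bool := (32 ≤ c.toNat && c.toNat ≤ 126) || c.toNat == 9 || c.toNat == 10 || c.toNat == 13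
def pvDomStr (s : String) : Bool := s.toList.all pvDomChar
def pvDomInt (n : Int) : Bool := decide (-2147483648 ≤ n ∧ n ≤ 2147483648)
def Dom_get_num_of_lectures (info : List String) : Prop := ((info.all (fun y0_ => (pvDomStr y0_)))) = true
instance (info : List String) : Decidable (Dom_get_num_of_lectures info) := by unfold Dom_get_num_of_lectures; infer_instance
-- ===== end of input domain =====

-- B replaces A's strip-all / filter / length-check / list.index re-lookup pipeline by one
-- direct scan with early return (objective: simpler).


-- ===== PORT A =====
def get_num_of_lectures (info : List String) : String :=
  let info2 := info.map PySem.Str.strip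
  let lectures := info2.filter (fun x => PySem.Str.endswith x "lectures")
  if lectures.length = 0 then "-"
  else
    -- lectures is nonempty here, so lectures[0] is its head; info.index / str.index /
    -- the indexing cannot fail on this branch, so the .getD defaults are never used
    let lecture_index := (PySem.List.index? info2 (lectures.headD "")).getD 0
    let num_of_lecture := (PySem.List.pyGet? info2 (lecture_index : Int)).getD ""
    PySem.Str.slice num_of_lecture (some 0)
      (some (PySem.Str.find num_of_lecture "lectures" - 1))

-- ===== PORT B =====
def get_num_of_lectures_alt : List String → String
  | [] => "-"
  | detail :: rest =>
    let elem := PySem.Str.strip detail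
    if PySem.Str.endswith elem "lectures" then
      PySem.Str.slice elem (some 0) (some (PySem.Str.find elem "lectures" - 1))
    else get_num_of_lectures_alt rest

-- ===== PRECONDITION & SPEC =====
def Spec_get_num_of_lectures (info : List String) (out : String) : Prop := out = get_num_of_lectures_alt info
instance (info : List String) (out : String) : Decidable (Spec_get_num_of_lectures info out) := by unfold Spec_get_num_of_lectures; infer_instance

-- ===== CLAIM (what is proved, stated in full; the proofs are below) =====
def Claim_equal_get_num_of_lectures : Prop := ∀ (info : List String), Dom_get_num_of_lectures info → Spec_get_num_of_lectures info (get_num_of_lectures info)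

-- ===== LEMMAS AND PROOFS =====

-- the slice formula both programs apply to a matching (already stripped) element
def pvF (s : String) : String :=
  PySem.Str.slice s (some 0) (some (PySem.Str.find s "lectures" - 1))

def pvP (s : String) : Bool := PySem.Str.endswith s "lectures"

-- B, expressed over the pre-stripped list via find?
lemma alt_eq_find? (info : List String) :
    get_num_of_lectures_alt info =
      match (info.map PySem.Str.strip).find? pvP with
      | none => "-"
      | some x => pvF x := by
  induction info with
  | nil => rfl
  | cons d rest ih =>
    simp only [get_num_of_lectures_alt, List.map_cons, List.find?_cons]
    by_cases h : pvP (PySem.Str.strip d)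
    · simp [pvP] at h; simp [h, pvP, pvF]
    · simp [pvP] at h; simp [h, ih, pvP]

-- head of the filtered list is find?
lemma head_filter_eq_find? (l : List String) (x : String) (t : List String)
    (h : l.filter pvP = x :: t) : l.find? pvP = some x := by
  induction l with
  | nil => simp at h
  | cons a r ih =>
    by_cases ha : pvP a
    · rw [List.filter_cons_of_pos ha] at h
      obtain ⟨h1, -⟩ := List.cons_eq_cons.mp h
      subst h1
      simp [ha]
    · rw [List.filter_cons_of_neg ha] at h
      simp [ha, ih h]

-- both sides, expressed over the pre-stripped list
lemma main_aux (l : List String) :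
    (if (l.filter pvP).length = 0 then "-"
     else pvF ((PySem.List.pyGet? l
        ((((PySem.List.index? l ((l.filter pvP).headD "")).getD 0 : Nat)) : Int)).getD ""))
    = match l.find? pvP with | none => "-" | some x => pvF x := by
  cases hf : l.filter pvP with
  | nil =>
    have hnone : l.find? pvP = none := by
      rw [List.find?_eq_none]
      intro x hx
      simpa using List.filter_eq_nil_iff.mp hf x hx
    rw [hnone]
    simp
  | cons x t =>
    have hfind : l.find? pvP = some x := head_filter_eq_find? l x t hf
    have hx : x ∈ l := List.mem_of_mem_filter (by simp [hf] : x ∈ l.filter pvP)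
    have hsome : (PySem.List.index? l x).isSome :=
      (PySem.List.index?_isSome_iff l x).2 hx
    obtain ⟨k, hk⟩ := Option.isSome_iff_exists.mp hsome
    obtain ⟨hlt, hget, -⟩ := PySem.List.getElem_of_index?_eq_some hk
    rw [hfind]
    simp only [List.length_cons, List.headD_cons, hk, Option.getD_some,
      PySem.List.pyGet?_natCast]
    simp [List.getElem?_eq_getElem hlt, hget]

theorem pv_main (info : List String) :
    get_num_of_lectures info = get_num_of_lectures_alt info := by
  rw [alt_eq_find?]
  exact main_aux (info.map PySem.Str.strip)

-- ===== VERDICT (by name: the statement is the Claim_ definition above) =====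
theorem get_num_of_lectures_spec : Claim_equal_get_num_of_lectures := by
  intro info _
  exact pv_main info
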